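-- pv_equiv track=rewrite | github.com/burikfried-cyber/podcast-creator | backend/app/services/detection/base_content_detector.py | _classify_era
-- ===== SOURCE A (Python) =====
-- from typing import Dict, List, Any, Optional
--
-- def _classify_era(periods: List) -> str:
--     """Classify historical era"""
--     if not periods:
--         return "unknown"
--
--     # Simple classification based on keywords
--     periods_str = " ".join(str(p) for p in periods).lower()
--
--     if "ancient" in periods_str or "bc" in periods_str or "bce" in periods_str:
--         return "ancient"
--     elif "medieval" in periods_str:
--         return "medieval"
--     elif "renaissance" in periods_str:
--         return "renaissance"
--     elif "modern" in periods_str or "contemporary" in periods_str: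
--         return "modern"
--     else:
--         return "historical"
-- ===== SOURCE B (Python) =====
-- _KEYWORDS = [
--     ("ancient", 0), ("bce", 0), ("bc", 0),
--     ("medieval", 1),
--     ("renaissance", 2),
--     ("modern", 3), ("contemporary", 3),
-- ]
-- _NAMES = ["ancient", "medieval", "renaissance", "modern", "historical"]
--
-- def _classify_era(periods):
--     """Classify historical era"""
--     if not periods:
--         return "unknown"
--     best = 4  # rank of the fallback "historical"
--     for p in periods:
--         s = str(p).lower()
--         for i in range(len(s)):
--             for kw, rank in _KEYWORDS:
--                 if rank < best and s.startswith(kw, i):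
--                     best = rank
--     return _NAMES[best]
-- ===== Notes on version B (the rewrite author's own statement) =====
-- stated objective: alternative
-- what changed: Instead of joining all periods into one lowered string and running an if/elif chain of substring-membership tests, B slides a window over every position of each lowercased period, matches a rank-annotated keyword list at each offset, keeps the minimum rank seen, and finally indexes an era-name table with that rank.
import Mathlib
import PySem

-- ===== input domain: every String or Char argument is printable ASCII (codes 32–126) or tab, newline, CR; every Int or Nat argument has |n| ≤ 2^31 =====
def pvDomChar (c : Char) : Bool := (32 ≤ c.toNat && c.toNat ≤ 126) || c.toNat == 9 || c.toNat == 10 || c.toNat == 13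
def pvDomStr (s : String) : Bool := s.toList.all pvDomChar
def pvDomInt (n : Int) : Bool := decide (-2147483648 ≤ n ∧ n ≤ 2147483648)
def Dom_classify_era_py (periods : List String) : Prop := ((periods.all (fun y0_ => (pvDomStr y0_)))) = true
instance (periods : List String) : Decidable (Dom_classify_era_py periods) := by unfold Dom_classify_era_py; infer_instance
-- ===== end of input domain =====

-- B replaces A's join-then-substring-membership if/elif chain by an explicit
-- position scan of each lowered period against a rank-annotated keyword table,
-- keeping the minimum rank (alternative decomposition; no speed claim).

-- ===== PORT A =====
-- the if/elif chain of A, applied to the joined lowered string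
def classifyFromStr (periods_str : String) : String :=
  if PySem.Str.isIn "ancient" periods_str || PySem.Str.isIn "bc" periods_str
      || PySem.Str.isIn "bce" periods_str then "ancient"
  else if PySem.Str.isIn "medieval" periods_str then "medieval"
  else if PySem.Str.isIn "renaissance" periods_str then "renaissance"
  else if PySem.Str.isIn "modern" periods_str
      || PySem.Str.isIn "contemporary" periods_str then "modern"
  else "historical"

def classify_era_py (periods : List String) : String :=
  if periods = [] then "unknown"
  else classifyFromStr (PySem.Str.lower (PySem.Str.join " " periods))

-- ===== PORT B =====
def pvKeywords : List (String × Nat) :=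
  [("ancient", 0), ("bce", 0), ("bc", 0),
   ("medieval", 1),
   ("renaissance", 2),
   ("modern", 3), ("contemporary", 3)]

def pvNames : List String := ["ancient", "medieval", "renaissance", "modern", "historical"]

-- inner keyword loop at one offset: s.startswith(kw, i) with 0 ≤ i < len(s)
-- is exactly 'kw.toList is a prefix of s.drop i'
def scanAt (s : List Char) (b : Nat) (i : Nat) : Nat :=
  pvKeywords.foldl (fun b p => if p.2 < b ∧ p.1.toList.isPrefixOf (s.drop i) then p.2 else b) b

-- the 'for i in range(len(s))' loop
def scanStr (s : List Char) (b : Nat) : Nat :=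
  (List.range s.length).foldl (scanAt s) b

-- best starts at 4 and only decreases, so NAMES[best] never raises; getD is exact here
def classify_era_py_alt (periods : List String) : String :=
  if periods = [] then "unknown"
  else pvNames.getD (periods.foldl (fun b p => scanStr (PySem.Str.lower p).toList b) 4) "historical"

-- ===== PRECONDITION & SPEC =====
def Spec_classify_era_py (periods : List String) (out : String) : Prop := out = classify_era_py_alt periods
instance (periods : List String) (out : String) : Decidable (Spec_classify_era_py periods out) := by unfold Spec_classify_era_py; infer_instance

-- ===== CLAIM (what is proved, stated in full; the proofs are below) =====
def Claim_equal_classify_era_py : Prop := ∀ (periods : List String), Dom_classify_era_py periods → Spec_classify_era_py periods (classify_era_py periods)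

-- ===== LEMMAS AND PROOFS =====

-- a space-free prefix of u ++ ' ' :: v cannot cross the space
lemma prefix_space_split (sub u v : List Char) (h : (' ' : Char) ∉ sub)
    (hp : sub <+: (u ++ ' ' :: v)) : sub <+: u := by
  by_cases hl : sub.length ≤ u.length
  · rw [List.prefix_iff_eq_take, List.take_append,
        show sub.length - u.length = 0 by omega] at hp
    simp at hp
    rw [hp]
    exact List.take_prefix _ _
  · exfalso
    have hlt : u.length < sub.length := by omega
    have h2 := hp.getElem hlt
    rw [List.getElem_append_right (by omega)] at h2
    simp at h2
    exact h (h2 ▸ List.getElem_mem hlt)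

-- a space-free infix of u ++ ' ' :: v lies inside u or inside v
lemma infix_space_append (sub a b : List Char) (h : (' ' : Char) ∉ sub) :
    sub <:+: (a ++ ' ' :: b) ↔ sub <:+: a ∨ sub <:+: b := by
  constructor
  · intro hin
    rw [← PySem.Chars.isIn_iff_infix, ← PySem.Chars.exists_prefix_drop_iff_isIn] at hin
    obtain ⟨j, hj⟩ := hin
    by_cases hja : j ≤ a.length
    · left
      rw [List.drop_append, show j - a.length = 0 by omega, List.drop_zero] at hj
      exact (prefix_space_split sub _ b h hj).isInfix.trans (List.drop_suffix j a).isInfix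
    · right
      rw [show a ++ ' ' :: b = (a ++ [' ']) ++ b by simp] at hj
      rw [List.drop_append, List.drop_eq_nil_of_le (by simp; omega),
          List.nil_append] at hj
      exact hj.isInfix.trans (List.drop_suffix _ b).isInfix
  · rintro (hin | hin)
    · exact hin.trans (List.prefix_append a (' ' :: b)).isInfix
    · exact hin.trans ((List.suffix_cons ' ' b).trans (List.suffix_append a _)).isInfix

-- lowercasing commutes with joining on " " (space lowers to itself)
lemma lower_join : ∀ (parts : List (List Char)),
    PySem.Chars.lower (PySem.Chars.join [' '] parts) =
      PySem.Chars.join [' '] (parts.map PySem.Chars.lower)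
  | [] => rfl
  | [p] => by rw [List.map_singleton, PySem.Chars.join_singleton, PySem.Chars.join_singleton]
  | p :: q :: rest => by
    have IH := lower_join (q :: rest)
    simp only [List.map_cons, PySem.Chars.join_cons_cons]
    rw [show (PySem.Chars.lower q :: List.map PySem.Chars.lower rest)
          = List.map PySem.Chars.lower (q :: rest) from rfl, ← IH]
    simp only [PySem.Chars.lower, List.map_append]
    rw [show List.map PySem.Chars.lowerChar [' '] = [' '] from by decide]

-- a space-free keyword occurs in the " "-join iff it occurs in some part
lemma isIn_join (sub : List Char) (h : (' ' : Char) ∉ sub) :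
    ∀ (parts : List (List Char)), parts ≠ [] →
    PySem.Chars.isIn sub (PySem.Chars.join [' '] parts) = parts.any (fun p => PySem.Chars.isIn sub p)
  | [], hne => absurd rfl hne
  | [p], _ => by rw [PySem.Chars.join_singleton]; simp
  | p :: q :: rest, _ => by
    have IH := isIn_join sub h (q :: rest) (by simp)
    have IH' : sub <:+: PySem.Chars.join [' '] (q :: rest) ↔
        ((q :: rest).any (fun p => PySem.Chars.isIn sub p)) = true := by
      rw [← PySem.Chars.isIn_iff_infix, IH]
    rw [PySem.Chars.join_cons_cons,
        show p ++ [' '] ++ PySem.Chars.join [' '] (q :: rest)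
           = p ++ ' ' :: PySem.Chars.join [' '] (q :: rest) by simp]
    rw [Bool.eq_iff_iff, PySem.Chars.isIn_iff_infix, infix_space_append _ _ _ h]
    simp only [List.any_cons, Bool.or_eq_true, PySem.Chars.isIn_iff_infix] at *
    tauto

-- string-level: keyword-in-lowered-join equals any-over-lowered-periods
lemma isIn_lower_join (k : String) (hk : (' ' : Char) ∉ k.toList)
    (periods : List String) (hne : periods ≠ []) :
    PySem.Str.isIn k (PySem.Str.lower (PySem.Str.join " " periods)) =
      periods.any (fun p => PySem.Str.isIn k (PySem.Str.lower p)) := by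
  rw [show PySem.Str.isIn k (PySem.Str.lower (PySem.Str.join " " periods))
        = PySem.Chars.isIn k.toList (PySem.Str.lower (PySem.Str.join " " periods)).toList from by
      simp [PySem.Str.isIn_eq]]
  rw [PySem.Str.toList_lower, PySem.Str.toList_join,
      show (" " : String).toList = [' '] from rfl,
      lower_join, isIn_join k.toList hk _ (by simpa using hne)]
  simp only [List.any_map]
  exact PySem.List.any_congr_mem (fun p _ => by
    simp [Function.comp, PySem.Str.isIn_eq, PySem.Str.toList_lower])

-- generic: a foldl whose every step satisfies a '≤ r' characterisation
lemma foldl_le_iff {α : Type} (g : Nat → α → Nat) (Q : α → Nat → Prop)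
    (hg : ∀ b x r, g b x ≤ r ↔ b ≤ r ∨ Q x r) :
    ∀ (l : List α) (b r : Nat), (l.foldl g b ≤ r ↔ b ≤ r ∨ ∃ x ∈ l, Q x r)
  | [], b, r => by simp
  | x :: xs, b, r => by
    rw [List.foldl_cons, foldl_le_iff g Q hg xs (g b x) r, hg]
    simp only [List.exists_mem_cons_iff]
    tauto

-- the inner keyword loop
lemma scanAt_le_iff (s : List Char) (b i r : Nat) :
    scanAt s b i ≤ r ↔ b ≤ r ∨ ∃ p ∈ pvKeywords, p.1.toList.isPrefixOf (s.drop i) = true ∧ p.2 ≤ r := by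
  unfold scanAt
  refine foldl_le_iff _ (fun p r => p.1.toList.isPrefixOf (s.drop i) = true ∧ p.2 ≤ r)
    (fun b p r => ?_) pvKeywords b r
  by_cases hp : p.1.toList.isPrefixOf (s.drop i) = true <;> by_cases hb : p.2 < b <;>
    simp [hp, hb] <;> omega

-- the position loop
lemma scanStr_le_iff (s : List Char) (b r : Nat) :
    scanStr s b ≤ r ↔ b ≤ r ∨ ∃ p ∈ pvKeywords,
      (∃ i, i < s.length ∧ p.1.toList.isPrefixOf (s.drop i) = true) ∧ p.2 ≤ r := by
  unfold scanStr
  rw [foldl_le_iff (scanAt s) (fun i r => ∃ p ∈ pvKeywords, p.1.toList.isPrefixOf (s.drop i) = true ∧ p.2 ≤ r)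
        (fun b i r => scanAt_le_iff s b i r) (List.range s.length) b r]
  constructor
  · rintro (h | ⟨i, hi, p, hp, hpre, hr⟩)
    · exact Or.inl h
    · exact Or.inr ⟨p, hp, ⟨i, List.mem_range.mp hi, hpre⟩, hr⟩
  · rintro (h | ⟨p, hp, ⟨i, hi, hpre⟩, hr⟩)
    · exact Or.inl h
    · exact Or.inr ⟨i, List.mem_range.mpr hi, p, hp, hpre, hr⟩

-- bounded prefix-at-some-offset equals substring occurrence, for nonempty keywords
lemma exists_prefix_iff_isIn (k s : List Char) (hk : k ≠ []) :
    (∃ i, i < s.length ∧ k.isPrefixOf (s.drop i) = true) ↔ PySem.Chars.isIn k s = true := by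
  rw [← PySem.Chars.exists_prefix_drop_iff_isIn]
  constructor
  · rintro ⟨i, _, hp⟩
    exact ⟨i, List.isPrefixOf_iff_prefix.mp hp⟩
  · rintro ⟨j, hj⟩
    by_cases hjl : j < s.length
    · exact ⟨j, hjl, List.isPrefixOf_iff_prefix.mpr hj⟩
    · exfalso
      rw [List.drop_eq_nil_of_le (by omega), List.prefix_nil] at hj
      exact hk hj

-- the whole scan over the periods, characterised by keyword occurrence
lemma best_le_iff (periods : List String) (r : Nat) :
    periods.foldl (fun b p => scanStr (PySem.Str.lower p).toList b) 4 ≤ r ↔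
      4 ≤ r ∨ ∃ p ∈ pvKeywords,
        (periods.any (fun q => PySem.Str.isIn p.1 (PySem.Str.lower q))) = true ∧ p.2 ≤ r := by
  rw [foldl_le_iff (fun b p => scanStr (PySem.Str.lower p).toList b)
        (fun q r => ∃ p ∈ pvKeywords,
          (∃ i, i < (PySem.Str.lower q).toList.length ∧
            p.1.toList.isPrefixOf ((PySem.Str.lower q).toList.drop i) = true) ∧ p.2 ≤ r)
        (fun b q r => scanStr_le_iff (PySem.Str.lower q).toList b r) periods 4 r]
  have hval : ∀ (p : String × Nat), p ∈ pvKeywords → ∀ q : String,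
      ((∃ i, i < (PySem.Str.lower q).toList.length ∧
          p.1.toList.isPrefixOf ((PySem.Str.lower q).toList.drop i) = true) ↔
        PySem.Str.isIn p.1 (PySem.Str.lower q) = true) := by
    intro p hp q
    have hk : p.1.toList ≠ [] := by
      simp only [pvKeywords, List.mem_cons, List.not_mem_nil, or_false] at hp
      rcases hp with h|h|h|h|h|h|h <;> subst h <;> decide
    rw [exists_prefix_iff_isIn _ _ hk]
    simp [PySem.Str.isIn_eq]
  constructor
  · rintro (h | ⟨q, hq, p, hp, hex, hr⟩)
    · exact Or.inl h
    · exact Or.inr ⟨p, hp, List.any_eq_true.mpr ⟨q, hq, (hval p hp q).mp hex⟩, hr⟩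
  · rintro (h | ⟨p, hp, hany, hr⟩)
    · exact Or.inl h
    · obtain ⟨q, hq, hin⟩ := List.any_eq_true.mp hany
      exact Or.inr ⟨q, hq, p, hp, (hval p hp q).mpr hin, hr⟩

-- from the characterisation, the chain over occurrence booleans equals NAMES[best]
lemma chain_eq_names (f : String → Bool) (best : Nat)
    (hch : ∀ r, best ≤ r ↔ 4 ≤ r ∨ ∃ p ∈ pvKeywords, f p.1 = true ∧ p.2 ≤ r) :
    (if f "ancient" || f "bc" || f "bce" then "ancient"
     else if f "medieval" then "medieval"
     else if f "renaissance" then "renaissance"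
     else if f "modern" || f "contemporary" then "modern"
     else "historical") = pvNames.getD best "historical" := by
  have h0 := hch 0; have h1 := hch 1; have h2 := hch 2; have h3 := hch 3; have h4 := hch 4
  simp only [pvKeywords, List.exists_mem_cons_iff, List.not_mem_nil, false_and,
    exists_false, or_false] at h0 h1 h2 h3 h4
  norm_num at h0 h1 h2 h3 h4
  by_cases hA : (f "ancient" || f "bc" || f "bce") = true
  · have hA' : f "ancient" = true ∨ f "bc" = true ∨ f "bce" = true := by
      simpa [Bool.or_eq_true, or_assoc] using hA
    have hb : best = 0 := h0.mpr (by
      rcases hA' with h|h|h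
      exacts [Or.inl h, Or.inr (Or.inr h), Or.inr (Or.inl h)])
    rw [if_pos hA, hb]; rfl
  · have hA' : ¬ f "ancient" = true ∧ ¬ f "bc" = true ∧ ¬ f "bce" = true := by
      simpa [Bool.or_eq_true, not_or, or_assoc] using hA
    obtain ⟨ea, eb, ec⟩ := hA'
    have l0 : best ≠ 0 := fun h => by
      rcases h0.mp h with h|h|h
      exacts [absurd h ea, absurd h ec, absurd h eb]
    rw [if_neg hA]
    by_cases hM : f "medieval" = true
    · have hb : best = 1 := by
        have l1 : best ≤ 1 := h1.mpr (Or.inr (Or.inr (Or.inr hM)))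
        omega
      rw [if_pos hM, hb]; rfl
    · have l1 : ¬ best ≤ 1 := fun h => by
        rcases h1.mp h with h|h|h|h
        exacts [absurd h ea, absurd h ec, absurd h eb, absurd h hM]
      rw [if_neg hM]
      by_cases hR : f "renaissance" = true
      · have hb : best = 2 := by
          have l2 : best ≤ 2 := h2.mpr (Or.inr (Or.inr (Or.inr (Or.inr hR))))
          omega
        rw [if_pos hR, hb]; rfl
      · have l2 : ¬ best ≤ 2 := fun h => by
          rcases h2.mp h with h|h|h|h|h
          exacts [absurd h ea, absurd h ec, absurd h eb, absurd h hM, absurd h hR]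
        rw [if_neg hR]
        by_cases hMo : (f "modern" || f "contemporary") = true
        · have hMo' : f "modern" = true ∨ f "contemporary" = true := by
            simpa [Bool.or_eq_true] using hMo
          have hb : best = 3 := by
            have l3 : best ≤ 3 := h3.mpr (by
              rcases hMo' with h|h
              exacts [Or.inr (Or.inr (Or.inr (Or.inr (Or.inr (Or.inl h))))),
                      Or.inr (Or.inr (Or.inr (Or.inr (Or.inr (Or.inr h)))))])
            omega
          rw [if_pos hMo, hb]; rfl
        · have hMo' : ¬ f "modern" = true ∧ ¬ f "contemporary" = true := by
            simpa [Bool.or_eq_true, not_or] using hMo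
          obtain ⟨em, eco⟩ := hMo'
          have l3 : ¬ best ≤ 3 := fun h => by
            rcases h3.mp h with h|h|h|h|h|h|h
            exacts [absurd h ea, absurd h ec, absurd h eb, absurd h hM, absurd h hR,
                    absurd h em, absurd h eco]
          have hb : best = 4 := by omega
          rw [if_neg hMo, hb]; rfl

lemma main_eq (periods : List String) :
    classify_era_py periods = classify_era_py_alt periods := by
  cases periods with
  | nil => rfl
  | cons x xs =>
    have hne : (x :: xs : List String) ≠ [] := by simp
    unfold classify_era_py classify_era_py_alt classifyFromStr
    rw [if_neg hne, if_neg hne]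
    rw [isIn_lower_join "ancient" (by decide) _ hne,
        isIn_lower_join "bc" (by decide) _ hne,
        isIn_lower_join "bce" (by decide) _ hne,
        isIn_lower_join "medieval" (by decide) _ hne,
        isIn_lower_join "renaissance" (by decide) _ hne,
        isIn_lower_join "modern" (by decide) _ hne,
        isIn_lower_join "contemporary" (by decide) _ hne]
    exact chain_eq_names
      (fun k => (x :: xs).any (fun p => PySem.Str.isIn k (PySem.Str.lower p)))
      _ (best_le_iff (x :: xs))

-- ===== VERDICT (by name: the statement is the Claim_ definition above) =====
theorem classify_era_py_spec : Claim_equal_classify_era_py := by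
  intro periods _
  unfold Spec_classify_era_py
  exact main_eq periods
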